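-- pv_equiv track=rewrite | github.com/akgoldberg/smooth_lottery | merit_baselines/algorithm/full_LP.py | generate_prefix_selections
-- ===== SOURCE A (Python) =====
-- def generate_prefix_selections(sets, m):
--     """
--     Given a list of lists sets and an integer m, generate every possible way
--     to choose m items from the union of sets with the constraint that from
--     each list we only take a prefix (i.e. the first a_i items from list i).
--
--     Note: It is assumed that the total number of items available (sum of lengths) is at least m.
--     """
--     # For each list, the maximum allowed count is its length.
--     bounds = [len(lst) for lst in sets]
--     k = len(sets)
--
--     # Helper function: recursively generate all vectors of length `k` that sum to `m`,
--     # with the extra constraint that the i-th element is at most bounds[i].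
--     def rec(i, remaining, current):
--         # if we are at the last list, then the last count must equal 'remaining'
--         if i == k - 1:
--             if 0 <= remaining <= bounds[i]:
--                 yield current + [remaining]
--             return
--         # For list i, try all possible selections from 0 to min(bounds[i], remaining)
--         for x in range(0, min(bounds[i], remaining) + 1):
--             yield from rec(i + 1, remaining - x, current + [x])
--
--     # Generate all possible a_lists (the composition of counts)
--     all_a_lists = list(rec(0, m, []))
--
--     # For each composition, build the corresponding selection (by taking the prefix of each list)
--     results = []
--     for a_list in all_a_lists:
--         selection = []
--         for sublist, count in zip(sets, a_list):
--             # take the prefix of length 'count'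
--             selection.extend(sublist[:count])
--         results.append((selection))
--
--     return results
-- ===== SOURCE B (Python) =====
-- def generate_prefix_selections(sets, m):
--     # Iterative worklist: one left-to-right pass over sets, building each
--     # partial selection incrementally; final filter keeps states with remaining == 0.
--     states = [(m, [])]
--     for lst in sets:
--         new_states = []
--         for rem, sel in states:
--             for x in range(min(len(lst), rem) + 1):
--                 new_states.append((rem - x, sel + lst[:x]))
--         states = new_states
--     return [sel for rem, sel in states if rem == 0]
-- ===== Notes on version B (the rewrite author's own statement) =====
-- stated objective: alternative
-- what changed: Replaced the recursive composition generator plus separate prefix-building pass with a single iterative worklist that expands partial (remaining, selection) states list by list, building each selection incrementally, and filters remaining == 0 at the end.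
import Mathlib
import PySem

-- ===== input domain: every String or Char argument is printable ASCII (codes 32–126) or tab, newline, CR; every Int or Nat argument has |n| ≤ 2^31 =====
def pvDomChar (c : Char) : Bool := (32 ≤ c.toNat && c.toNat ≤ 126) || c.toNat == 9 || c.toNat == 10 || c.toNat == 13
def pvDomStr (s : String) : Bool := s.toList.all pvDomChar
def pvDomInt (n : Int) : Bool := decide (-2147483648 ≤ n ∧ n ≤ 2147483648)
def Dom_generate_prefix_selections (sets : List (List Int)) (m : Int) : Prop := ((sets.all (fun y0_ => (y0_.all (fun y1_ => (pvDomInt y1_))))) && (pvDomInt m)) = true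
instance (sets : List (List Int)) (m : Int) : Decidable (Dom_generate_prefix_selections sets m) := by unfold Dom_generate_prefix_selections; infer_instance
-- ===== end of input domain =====

-- B replaces A's recursive composition generator + second prefix-building pass with a
-- single iterative worklist over (remaining, selection) states (alternative decomposition).
-- A raises IndexError on sets = []; Pre_ excludes that input.


-- ===== PORT A =====
-- rec(i, remaining, current): the index i into bounds is transcribed as structural
-- recursion on the tail of the bounds list (i == k-1 ⇔ the tail is a singleton).
-- The [] case is unreachable when sets ≠ [] (the Python raises IndexError there; Pre_ excludes it).
def pyRecA : List Int → Int → List Int → List (List Int)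
  | [], _, _ => []
  | [b], remaining, current =>
      if 0 ≤ remaining ∧ remaining ≤ b then [current ++ [remaining]] else []
  | b :: b' :: rest, remaining, current =>
      (PySem.List.pyRange 0 (min b remaining + 1) 1).foldl
        (fun acc x => acc ++ pyRecA (b' :: rest) (remaining - x) (current ++ [x])) []

def generate_prefix_selections (sets : List (List Int)) (m : Int) : List (List Int) :=
  let bounds := sets.map (fun lst => (lst.length : Int))
  let all_a_lists := pyRecA bounds m []
  all_a_lists.foldl
    (fun results a_list =>
      results ++ [(sets.zip a_list).foldl
        (fun selection p => selection ++ PySem.List.slice p.1 none (some p.2)) []]) []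

-- ===== PORT B =====
def altStep (states : List (Int × List Int)) (lst : List Int) : List (Int × List Int) :=
  states.foldl
    (fun new_states s =>
      new_states ++ (PySem.List.pyRange 0 (min (lst.length : Int) s.1 + 1) 1).map
        (fun x => (s.1 - x, s.2 ++ PySem.List.slice lst none (some x)))) []

def generate_prefix_selections_alt (sets : List (List Int)) (m : Int) : List (List Int) :=
  (sets.foldl altStep [(m, ([] : List Int))]).filterMap
    (fun s => if s.1 = 0 then some s.2 else none)

-- ===== PRECONDITION & SPEC =====
-- Pre_ excludes exactly sets = [], where Python A raises IndexError (bounds[0]).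
def Pre_generate_prefix_selections (sets : List (List Int)) (m : Int) : Prop := sets ≠ []
instance (sets : List (List Int)) (m : Int) : Decidable (Pre_generate_prefix_selections sets m) := by unfold Pre_generate_prefix_selections; infer_instance

def pvWitness_generate_prefix_selections : List (List Int) × Int := ([[1, 2], [3]], 2)

def Spec_generate_prefix_selections (sets : List (List Int)) (m : Int) (out : List (List Int)) : Prop := out = generate_prefix_selections_alt sets m
instance (sets : List (List Int)) (m : Int) (out : List (List Int)) : Decidable (Spec_generate_prefix_selections sets m out) := by unfold Spec_generate_prefix_selections; infer_instance

-- ===== CLAIM (what is proved, stated in full; the proofs are below) =====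
def Claim_equal_generate_prefix_selections : Prop := ∀ (sets : List (List Int)) (m : Int), Dom_generate_prefix_selections sets m → Pre_generate_prefix_selections sets m → Spec_generate_prefix_selections sets m (generate_prefix_selections sets m)

-- ===== LEMMAS AND PROOFS =====

-- Reference: selections built directly by recursion on the lists.
def goSel : List (List Int) → Int → List (List Int)
  | [], r => if r = 0 then [[]] else []
  | lst :: rest, r =>
      (PySem.List.pyRange 0 (min (lst.length : Int) r + 1) 1).flatMap
        (fun x => (goSel rest (r - x)).map (fun t => PySem.List.slice lst none (some x) ++ t))

theorem altStep_eq_flatMap (states : List (Int × List Int)) (lst : List Int) :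
    altStep states lst =
      states.flatMap (fun s => (PySem.List.pyRange 0 (min (lst.length : Int) s.1 + 1) 1).map
        (fun x => (s.1 - x, s.2 ++ PySem.List.slice lst none (some x)))) := by
  unfold altStep
  rw [PySem.List.foldl_append_eq_flatMap]
  simp

theorem alt_char (sets : List (List Int)) (states : List (Int × List Int)) :
    (sets.foldl altStep states).filterMap (fun s => if s.1 = 0 then some s.2 else none) =
      states.flatMap (fun s => (goSel sets s.1).map (fun t => s.2 ++ t)) := by
  induction sets generalizing states with
  | nil =>
    simp only [List.foldl_nil, goSel]
    rw [List.filterMap_eq_flatMap_toList]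
    apply List.flatMap_congr
    intro s _
    by_cases h : s.1 = 0
    · rw [if_pos h, if_pos h]; simp
    · rw [if_neg h, if_neg h]; simp
  | cons lst rest ih =>
    simp only [List.foldl_cons]
    rw [ih, altStep_eq_flatMap]
    simp only [goSel, List.flatMap_assoc, List.flatMap_map, List.map_flatMap, List.map_map,
      Function.comp_def, List.append_assoc]

theorem generate_prefix_selections_alt_eq (sets : List (List Int)) (m : Int) :
    generate_prefix_selections_alt sets m = goSel sets m := by
  unfold generate_prefix_selections_alt
  rw [alt_char]
  simp

-- Compositions reference for A.
def comps : List Int → Int → List (List Int)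
  | [], r => if r = 0 then [[]] else []
  | b :: rest, r =>
      (PySem.List.pyRange 0 (min b r + 1) 1).flatMap
        (fun x => (comps rest (r - x)).map (fun t => x :: t))

theorem comps_single_aux (r : Int) : ∀ (n : Nat) (a c : Int), (c - a).toNat = n →
    (PySem.List.pyRange a c).flatMap
      (fun x => (comps [] (r - x)).map (fun t => x :: t)) =
      if a ≤ r ∧ r < c then [[r]] else [] := by
  intro n
  induction n with
  | zero =>
    intro a c h
    rw [PySem.List.pyRange_one_eq_nil (by omega)]
    simp only [List.flatMap_nil]
    rw [if_neg (by omega)]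
  | succ k ih =>
    intro a c h
    rw [PySem.List.pyRange_one_cons (by omega)]
    simp only [List.flatMap_cons]
    rw [ih (a + 1) c (by omega)]
    simp only [comps]
    by_cases hra : r = a
    · subst hra
      rw [if_pos (by omega), if_neg (by omega), if_pos (by omega)]
      simp
    · rw [if_neg (by omega)]
      by_cases hr : a + 1 ≤ r ∧ r < c
      · rw [if_pos hr, if_pos (by omega)]
        simp
      · rw [if_neg hr, if_neg (by omega)]
        simp

theorem comps_singleton (b r : Int) :
    comps [b] r = if 0 ≤ r ∧ r ≤ b then [[r]] else [] := by
  show (PySem.List.pyRange 0 (min b r + 1)).flatMap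
      (fun x => (comps [] (r - x)).map (fun t => x :: t)) = _
  rw [comps_single_aux r (min b r + 1 - 0).toNat 0 (min b r + 1) rfl]
  by_cases h : 0 ≤ r ∧ r ≤ b
  · rw [if_pos (by omega), if_pos h]
  · rw [if_neg (by omega), if_neg h]

theorem pyRecA_eq (rest : List Int) (b r : Int) (cur : List Int) :
    pyRecA (b :: rest) r cur = (comps (b :: rest) r).map (fun t => cur ++ t) := by
  induction rest generalizing b r cur with
  | nil =>
    rw [comps_singleton]
    simp only [pyRecA]
    by_cases h : 0 ≤ r ∧ r ≤ b
    · rw [if_pos h, if_pos h]; simp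
    · rw [if_neg h, if_neg h]; simp
  | cons c rest' ih =>
    simp only [pyRecA]
    rw [PySem.List.foldl_append_eq_flatMap]
    simp only [List.nil_append, ih]
    show _ = ((PySem.List.pyRange 0 (min b r + 1)).flatMap
        (fun x => (comps (c :: rest') (r - x)).map (fun t => x :: t))).map (fun t => cur ++ t)
    simp [List.map_flatMap, List.map_map, Function.comp_def]

def buildSel (sets : List (List Int)) (a : List Int) : List Int :=
  (sets.zip a).foldl (fun selection p => selection ++ PySem.List.slice p.1 none (some p.2)) []

theorem buildSel_cons (lst : List Int) (rest : List (List Int)) (x : Int) (t : List Int) :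
    buildSel (lst :: rest) (x :: t) = PySem.List.slice lst none (some x) ++ buildSel rest t := by
  unfold buildSel
  simp only [List.zip_cons_cons, List.foldl_cons, List.nil_append]
  rw [PySem.List.foldl_append_eq_flatMap, PySem.List.foldl_append_eq_flatMap]
  simp

theorem goSel_eq_comps (sets : List (List Int)) (r : Int) :
    goSel sets r = (comps (sets.map (fun lst => (lst.length : Int))) r).map (buildSel sets) := by
  induction sets generalizing r with
  | nil =>
    simp only [goSel, List.map_nil, comps]
    by_cases h : r = 0 <;> simp [h, buildSel]
  | cons lst rest ih =>
    simp only [goSel, List.map_cons, comps, ih]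
    simp [List.map_flatMap, List.map_map, Function.comp_def, buildSel_cons]

-- ===== VERDICT (by name: the statement is the Claim_ definition above) =====
theorem generate_prefix_selections_spec : Claim_equal_generate_prefix_selections := by
  intro sets m _ hpre
  unfold Spec_generate_prefix_selections
  obtain ⟨lst, rest, rfl⟩ : ∃ l r, sets = l :: r := by
    cases sets with
    | nil => exact absurd rfl hpre
    | cons a b => exact ⟨a, b, rfl⟩
  unfold generate_prefix_selections
  rw [PySem.List.foldl_append_singleton_eq_map]
  simp only [List.map_cons, pyRecA_eq, List.map_map, List.nil_append, Function.comp_def]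
  rw [generate_prefix_selections_alt_eq, goSel_eq_comps]
  simp only [List.map_cons]
  rfl
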